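-- pv_equiv track=rewrite | github.com/christianbrodbeck/Eelbrain | eelbrain/_experiment/definitions.py | compound
-- ===== SOURCE A (Python) =====
-- def compound(items):
--     out = ''
--     for item in items:
--         if item == '*':
--             if not out.endswith('*'):
--                 out += '*'
--         elif item:
--             if out and not out.endswith('*'):
--                 out += ' '
--             out += item
--     return out
-- ===== SOURCE B (Python) =====
-- def compound(items):
--     # pass 1: normalize into a token list (drop falsy items, collapse '*' runs)
--     tokens = []
--     for item in items:
--         if item == '*':
--             if not (tokens and tokens[-1].endswith('*')):
--                 tokens.append('*')
--         elif item:
--             tokens.append(item)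
--     # pass 2: render, inserting a space only between two "word" tokens
--     out = ''
--     prev = None
--     for tok in tokens:
--         if prev is not None and not prev.endswith('*') and tok != '*':
--             out += ' '
--         out += tok
--         prev = tok
--     return out
-- ===== Notes on version B (the rewrite author's own statement) =====
-- stated objective: alternative
-- what changed: B splits A's single fused string-building loop into two passes: a normalization pass that builds a token list (dropping empty items and collapsing '*' runs) and a separate rendering pass that inserts spaces between word tokens.
import Mathlib
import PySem

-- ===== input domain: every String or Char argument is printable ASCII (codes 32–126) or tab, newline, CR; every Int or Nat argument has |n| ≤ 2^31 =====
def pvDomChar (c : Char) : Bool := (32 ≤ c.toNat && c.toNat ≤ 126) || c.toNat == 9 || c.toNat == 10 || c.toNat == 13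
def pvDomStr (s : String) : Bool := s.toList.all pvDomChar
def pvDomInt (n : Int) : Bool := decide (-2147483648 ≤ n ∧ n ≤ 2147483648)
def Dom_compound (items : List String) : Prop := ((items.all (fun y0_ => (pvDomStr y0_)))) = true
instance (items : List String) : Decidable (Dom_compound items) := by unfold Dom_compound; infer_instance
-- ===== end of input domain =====

-- B replaces A's single fused string-building loop by two passes (tokenize, then render);
-- objective: alternative decomposition, same cost.

-- ===== PORT A =====
def compoundStep (out : String) (item : String) : String :=
  if item = "*" then
    if !(PySem.Str.endswith out "*") then out ++ "*" else out
  else if item ≠ "" then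
    (if out ≠ "" && !(PySem.Str.endswith out "*") then out ++ " " else out) ++ item
  else out

def compound (items : List String) : String :=
  items.foldl compoundStep ""

-- ===== PORT B =====
-- pass 1: token list
def tokStep (toks : List String) (item : String) : List String :=
  if item = "*" then
    if !(decide (toks ≠ []) && PySem.Str.endswith (PySem.List.pyGetD toks (-1) "") "*") then
      toks ++ ["*"]
    else toks
  else if item ≠ "" then toks ++ [item] else toks

-- pass 2: render (state = (out, prev))
def renderStep (st : String × Option String) (tok : String) : String × Option String :=
  let sp := (match st.2 with
             | some p => !(PySem.Str.endswith p "*")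
             | none => false) && tok ≠ "*"
  ((if sp then st.1 ++ " " else st.1) ++ tok, some tok)

def compound_alt (items : List String) : String :=
  ((items.foldl tokStep []).foldl renderStep ("", none)).1

-- ===== PRECONDITION & SPEC =====
def Spec_compound (items : List String) (out : String) : Prop := out = compound_alt items
instance (items : List String) (out : String) : Decidable (Spec_compound items out) := by unfold Spec_compound; infer_instance

-- ===== CLAIM (what is proved, stated in full; the proofs are below) =====
def Claim_equal_compound : Prop := ∀ (items : List String), Dom_compound items → Spec_compound items (compound items)

-- ===== LEMMAS AND PROOFS =====

theorem estar (s : String) : PySem.Str.endswith s "*" = true ↔ s.toList.getLast? = some '*' := by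
  have hstar : ("*" : String).toList = ['*'] := rfl
  rw [show PySem.Str.endswith s "*" = PySem.Chars.endswith s.toList ['*'] by
        simp [← hstar]]
  rw [PySem.Chars.endswith_iff, List.getLast?_eq_some_iff]
  constructor
  · rintro ⟨t, ht⟩; exact ⟨t, ht.symm⟩
  · rintro ⟨t, ht⟩; exact ⟨t, ht.symm⟩

theorem estar_eq (s t : String) (h : s.toList.getLast? = t.toList.getLast?) :
    PySem.Str.endswith s "*" = PySem.Str.endswith t "*" :=
  Bool.eq_iff_iff.mpr (by rw [estar, estar, h])

theorem endswith_nil : PySem.Chars.endswith [] ['*'] = false := by decide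

theorem renderS_append (toks : List String) (u : String) :
    ((toks ++ [u]).foldl renderStep ("", none)) = renderStep (toks.foldl renderStep ("", none)) u := by
  simp [List.foldl_append]

-- invariants of the render fold (the space logic does not matter for them)
theorem render_inv (toks : List String) (h : ∀ t ∈ toks, t ≠ "") :
    (toks.foldl renderStep ("", none)).2 = toks.getLast?
    ∧ ((toks.foldl renderStep ("", none)).1 = "" ↔ toks = [])
    ∧ (toks.foldl renderStep ("", none)).1.toList.getLast?
        = toks.getLast?.bind (fun t => t.toList.getLast?) := by
  induction toks using List.reverseRecOn with
  | nil => simp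
  | append_singleton l t ih =>
    have hl : ∀ x ∈ l, x ≠ "" := fun x hx => h x (by simp [hx])
    have ht : t ≠ "" := h t (by simp)
    have htl : t.toList ≠ [] := fun hc => ht (String.toList_eq_nil_iff.mp hc)
    obtain ⟨ih2, ih0, ih3⟩ := ih hl
    rw [renderS_append]
    refine ⟨by simp [renderStep], ?_, ?_⟩
    · simp only [renderStep]
      constructor
      · intro hc
        have := congrArg String.toList hc
        rw [String.toList_append] at this
        simp at this
        exact (ht this.2).elim
      · intro hc; simp at hc
    · simp only [renderStep]
      rw [String.toList_append, List.getLast?_append_of_ne_nil _ htl]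
      simp

-- one loop iteration of A agrees with tokenizing then rendering
theorem step_agree (toks : List String) (item : String) (h : ∀ t ∈ toks, t ≠ "") :
    compoundStep ((toks.foldl renderStep ("", none)).1) item
      = ((tokStep toks item).foldl renderStep ("", none)).1 := by
  obtain ⟨h2, h0, h3⟩ := render_inv toks h
  rcases List.eq_nil_or_concat toks with hnil | ⟨l, a, hla⟩
  · subst hnil
    by_cases hi : item = "*"
    · subst hi
      simp [compoundStep, tokStep, renderStep, endswith_nil]
    · by_cases hn : item = ""
      · simp [compoundStep, tokStep, hn]
      · simp [compoundStep, tokStep, renderStep, hi, hn, endswith_nil]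
  · subst hla
    rw [List.concat_eq_append] at h2 h0 h3 h ⊢
    have ha : ¬ a = "" := h a (by simp)
    have hne : (List.foldl renderStep ("", none) (l ++ [a])).1 ≠ "" := by
      intro hc
      simpa using h0.mp hc
    have h3' : (List.foldl renderStep ("", none) (l ++ [a])).1.toList.getLast?
        = a.toList.getLast? := by
      rw [h3]; simp
    have hee := estar_eq _ _ h3'
    simp [renderStep] at hne hee
    by_cases hs : PySem.Str.endswith a "*" = true
    · have hsC : PySem.Chars.endswith a.toList ['*'] = true := by simpa using hs
      by_cases hi : item = "*"
      · subst hi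
        simp [compoundStep, tokStep, renderStep,
          PySem.List.pyGetD_neg_one_append_singleton, hee, hsC]
      · by_cases hn : item = ""
        · simp [compoundStep, tokStep, hn]
        · simp [compoundStep, tokStep, renderStep, hee, hsC, hi, hn, ha]
    · have hsC : PySem.Chars.endswith a.toList ['*'] = false := by
        simpa using Bool.eq_false_iff.mpr hs
      by_cases hi : item = "*"
      · subst hi
        simp [compoundStep, tokStep, renderStep,
          PySem.List.pyGetD_neg_one_append_singleton, hee, hsC]
      · by_cases hn : item = ""
        · simp [compoundStep, tokStep, hn]
        · simp [compoundStep, tokStep, renderStep, hee, hsC, hi, hn, ha]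

theorem tokStep_pres (toks : List String) (item : String) (h : ∀ t ∈ toks, t ≠ "") :
    ∀ t ∈ tokStep toks item, t ≠ "" := by
  intro t htmem
  unfold tokStep at htmem
  split_ifs at htmem with hi hc hni
  · rcases List.mem_append.mp htmem with hm | hm
    · exact h t hm
    · simp at hm; subst hm; simp
  · exact h t htmem
  · rcases List.mem_append.mp htmem with hm | hm
    · exact h t hm
    · simp at hm; subst hm; exact hni
  · exact h t htmem

theorem main_lemma (items : List String) : ∀ (toks : List String), (∀ t ∈ toks, t ≠ "") →
    items.foldl compoundStep (toks.foldl renderStep ("", none)).1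
      = ((items.foldl tokStep toks).foldl renderStep ("", none)).1 := by
  induction items with
  | nil => intro toks _; simp
  | cons item rest ih =>
    intro toks h
    rw [List.foldl_cons, List.foldl_cons, step_agree toks item h]
    exact ih (tokStep toks item) (tokStep_pres toks item h)

-- ===== VERDICT (by name: the statement is the Claim_ definition above) =====
theorem compound_spec : Claim_equal_compound := by
  intro items _
  unfold Spec_compound compound compound_alt
  have := main_lemma items [] (by simp)
  simpa using this
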